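-- pv_equiv track=rewrite | github.com/Kawser-nerd/CLCDSA | Source Codes/AtCoder/arc040/B/3420975.py | check
-- ===== SOURCE A (Python) =====
-- def check(d):
--     l = 0
--     for i in d:
--         if i == "o":
--             l += 1
--     if l == len(d):
--         return True
--     return False
-- ===== SOURCE B (Python) =====
-- def check(d):
--     return set(d) <= {"o"}
-- ===== Notes on version B (the rewrite author's own statement) =====
-- stated objective: simpler
-- what changed: Replaced the counting loop and length comparison by building the set of distinct characters once and testing that it is a subset of the singleton set of the letter o.
import Mathlib
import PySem

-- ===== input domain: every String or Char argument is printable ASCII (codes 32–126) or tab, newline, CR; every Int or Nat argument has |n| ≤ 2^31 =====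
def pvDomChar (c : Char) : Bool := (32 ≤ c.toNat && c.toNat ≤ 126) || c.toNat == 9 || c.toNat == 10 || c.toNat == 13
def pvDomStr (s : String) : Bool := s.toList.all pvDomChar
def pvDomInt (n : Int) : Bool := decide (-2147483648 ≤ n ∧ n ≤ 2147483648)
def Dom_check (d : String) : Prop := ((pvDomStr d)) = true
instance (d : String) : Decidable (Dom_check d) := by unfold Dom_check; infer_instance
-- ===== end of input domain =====

-- B builds the set of distinct characters once and tests subset of the singleton letter-o set, replacing A's running count and length comparison; objective: simpler.

-- ===== PORT A =====
def check (d : String) : Bool :=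
  let l := d.toList.foldl (fun l i => if i == 'o' then l + 1 else l) (0 : Int)
  if l == (PySem.Str.len d : Int) then true else false

-- ===== PORT B =====
def check_alt (d : String) : Bool :=
  PySem.Set.issubset (PySem.Set.ofList d.toList) ['o']

-- ===== PRECONDITION & SPEC =====
def Spec_check (d : String) (out : Bool) : Prop := out = check_alt d
instance (d : String) (out : Bool) : Decidable (Spec_check d out) := by unfold Spec_check; infer_instance

-- ===== CLAIM (what is proved, stated in full; the proofs are below) =====
def Claim_equal_check : Prop := ∀ (d : String), Dom_check d → Spec_check d (check d)

-- ===== LEMMAS AND PROOFS =====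

-- A's counter never exceeds the remaining length, and equals it iff every char is 'o'.
lemma count_le (xs : List Char) (l : Int) :
    xs.foldl (fun l i => if i == 'o' then l + 1 else l) l ≤ l + xs.length := by
  induction xs generalizing l with
  | nil => simp
  | cons x xs ih =>
    simp only [List.foldl_cons, List.length_cons]
    split
    · have := ih (l + 1); push_cast at *; omega
    · have := ih l; push_cast at *; omega

lemma count_eq_iff (xs : List Char) (l : Int) :
    (xs.foldl (fun l i => if i == 'o' then l + 1 else l) l = l + xs.length) ↔ ∀ x ∈ xs, x = 'o' := by
  induction xs generalizing l with
  | nil => simp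
  | cons x xs ih =>
    simp only [List.foldl_cons, List.length_cons, List.mem_cons]
    by_cases hx : x = 'o'
    · simp only [hx, beq_self_eq_true, if_true]
      rw [show (l : Int) + ((xs.length : Nat) + 1 : Nat) = (l + 1) + (xs.length : Nat) by push_cast; ring]
      constructor
      · intro h y hy; rcases hy with rfl | hy
        · rfl
        · exact (ih (l + 1)).mp h y hy
      · intro h; exact (ih (l + 1)).mpr (fun y hy => h y (Or.inr hy))
    · have hb : (x == 'o') = false := by simp [hx]
      simp only [hb]
      constructor
      · intro h
        have hle := count_le xs l
        push_cast at h
        omega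
      · intro h; exact absurd (h x (Or.inl rfl)) hx

-- ===== VERDICT (by name: the statement is the Claim_ definition above) =====
theorem check_spec : Claim_equal_check := by
  intro d _
  unfold Spec_check check check_alt
  have hsub : PySem.Set.issubset (PySem.Set.ofList d.toList) ['o'] = true ↔
      ∀ x ∈ d.toList, x = 'o' := by
    rw [PySem.Set.issubset_iff]
    constructor
    · intro h x hx
      have := h x (by rw [PySem.Set.mem_ofList]; exact hx)
      simpa using this
    · intro h x hx
      rw [PySem.Set.mem_ofList] at hx
      simp [h x hx]
  have hlen : (PySem.Str.len d : Int) = (d.toList.length : Int) := by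
    simp [PySem.Str.len]
  have hcnt := count_eq_iff d.toList 0
  simp only [zero_add] at hcnt
  by_cases hall : ∀ x ∈ d.toList, x = 'o'
  · have hb : PySem.Set.issubset (PySem.Set.ofList d.toList) ['o'] = true := hsub.mpr hall
    rw [hb]
    have heq := hcnt.mpr hall
    rw [hlen]
    simp only [beq_iff_eq]
    exact if_pos (by simpa using heq)
  · have hb : PySem.Set.issubset (PySem.Set.ofList d.toList) ['o'] = false := by
      rcases Bool.eq_false_or_eq_true (PySem.Set.issubset (PySem.Set.ofList d.toList) ['o']) with h | h
      · exact absurd (hsub.mp h) hall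
      · exact h
    rw [hb]
    have hne : d.toList.foldl (fun l i => if i == 'o' then l + 1 else l) 0 ≠ (d.toList.length : Int) :=
      fun h => hall (hcnt.mp h)
    rw [hlen]
    simp only [beq_iff_eq]
    exact if_neg (by simpa using hne)
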